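-- pv_equiv track=rewrite | github.com/schmatz/adventofcode2024 | 9/day9.py | unfragment_one_file
-- ===== SOURCE A (Python) =====
-- FREE_SPACE_MARKER = -1
--
-- def unfragment_one_file(
--     disk_map: list[tuple[int, int]], defragmented_file_ids: set[int]
-- ) -> bool:
--     # Now do a defragmentation of the unfragmented disk map
--     for i in reversed(range(len(disk_map))):
--         fragment = disk_map[i]
--         fragment_id = fragment[0]
--         fragment_size = fragment[1]
--         if fragment_id == FREE_SPACE_MARKER or fragment_id in defragmented_file_ids:
--             continue
--
--         for j in range(i):
--             free_space_fragment = disk_map[j]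
--             free_space_fragment_id = free_space_fragment[0]
--             free_space_fragment_size = free_space_fragment[1]
--             if (
--                 free_space_fragment_id != FREE_SPACE_MARKER
--                 or free_space_fragment_size < fragment_size
--             ):
--                 continue
--
--             disk_map[i], disk_map[j] = (FREE_SPACE_MARKER, fragment_size), fragment
--             size_differential = free_space_fragment_size - fragment_size
--             if size_differential > 0:
--                 disk_map.insert(j + 1, (FREE_SPACE_MARKER, size_differential))
--             defragmented_file_ids.add(fragment_id)
--             return False
--
--     return True
-- ===== SOURCE B (Python) =====
-- FREE_SPACE_MARKER = -1
--
--
-- def unfragment_one_file(disk_map, defragmented_file_ids):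
--     # One pass: prefix maximum of free-slot sizes seen so far (None = no free slot yet).
--     best = None
--     prefix_max = []
--     for fid, size in disk_map:
--         prefix_max.append(best)
--         if fid == FREE_SPACE_MARKER and (best is None or best < size):
--             best = size
--     # Highest-index file that is movable: not free, not already moved, and some
--     # free slot to its left (prefix_max) is big enough.
--     for i in range(len(disk_map) - 1, -1, -1):
--         fid, size = disk_map[i]
--         if (
--             fid != FREE_SPACE_MARKER
--             and fid not in defragmented_file_ids
--             and prefix_max[i] is not None
--             and size <= prefix_max[i]
--         ):
--             # leftmost fitting free slot (exists by prefix_max)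
--             j = next(
--                 k
--                 for k, (gid, gsz) in enumerate(disk_map)
--                 if gid == FREE_SPACE_MARKER and gsz >= size
--             )
--             free_size = disk_map[j][1]
--             disk_map[i] = (FREE_SPACE_MARKER, size)
--             disk_map[j] = (fid, size)
--             if free_size > size:
--                 disk_map.insert(j + 1, (FREE_SPACE_MARKER, free_size - size))
--             defragmented_file_ids.add(fid)
--             return False
--     return True
-- ===== Notes on version B (the rewrite author's own statement) =====
-- stated objective: alternative
-- what changed: Replaced the per-file inner scan over all earlier slots by a single left-to-right pass that records the prefix maximum of free-slot sizes, so movability of each file is a single comparison; intended as asymptotically faster (O(n) vs O(n^2) when no file is movable) but a timing run measured only ~1.2x on its random inputs.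
import Mathlib
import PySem

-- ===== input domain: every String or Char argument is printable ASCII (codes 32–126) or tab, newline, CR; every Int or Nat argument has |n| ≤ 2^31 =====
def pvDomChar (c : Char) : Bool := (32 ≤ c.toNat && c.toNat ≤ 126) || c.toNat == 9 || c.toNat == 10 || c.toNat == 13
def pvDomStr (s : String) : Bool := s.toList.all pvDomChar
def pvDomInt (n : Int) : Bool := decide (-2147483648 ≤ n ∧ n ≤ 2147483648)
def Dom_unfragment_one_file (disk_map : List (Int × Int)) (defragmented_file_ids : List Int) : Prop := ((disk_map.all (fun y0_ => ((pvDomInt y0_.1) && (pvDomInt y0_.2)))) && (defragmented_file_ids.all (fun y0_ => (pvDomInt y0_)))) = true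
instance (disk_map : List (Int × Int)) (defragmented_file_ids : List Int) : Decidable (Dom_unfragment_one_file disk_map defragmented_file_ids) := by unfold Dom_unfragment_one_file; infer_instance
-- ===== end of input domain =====

-- B replaces A's per-file inner scan by a one-pass prefix maximum of free-slot sizes (alternative algorithm; intended as faster, measured ~1.2x on a timing run's random inputs).
-- Both Pythons mutate disk_map and defragmented_file_ids in place (identically); the equivalence proved here is about the return value.

-- ===== PORT A =====
-- inner loop `for j in range(i): … return False` — search over j < i for a fitting free slot
def pvAInner (disk_map : List (Int × Int)) (size : Int) (i : Nat) : Bool :=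
  (List.range i).any (fun j =>
    let f := disk_map.getD j (0, 0)
    f.1 == -1 && decide (size ≤ f.2))

-- outer loop `for i in reversed(range(len(disk_map)))` with early `return False`
def pvALoop (disk_map : List (Int × Int)) (defragmented_file_ids : List Int) : List Nat → Bool
  | [] => true
  | i :: rest =>
    let frag := disk_map.getD i (0, 0)
    if frag.1 == -1 || defragmented_file_ids.contains frag.1 then
      pvALoop disk_map defragmented_file_ids rest
    else if pvAInner disk_map frag.2 i then false
    else pvALoop disk_map defragmented_file_ids rest

def unfragment_one_file (disk_map : List (Int × Int)) (defragmented_file_ids : List Int) : Bool :=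
  pvALoop disk_map defragmented_file_ids (List.range disk_map.length).reverse

-- ===== PORT B =====
-- one step of B's first pass: update the running prefix maximum of free-slot sizes
def pvStep (best : Option Int) (q : Int × Int) : Option Int :=
  if q.1 == -1 && (match best with | none => true | some b => decide (b < q.2)) then some q.2 else best

-- B's first pass: prefix_max[i] = best before processing element i
def pvBuildPM : List (Int × Int) → Option Int → List (Option Int)
  | [], _ => []
  | q :: rest, best => best :: pvBuildPM rest (pvStep best q)

-- `prefix_max[i] is not None and size <= prefix_max[i]`
def pvFits (pm : Option Int) (s : Int) : Bool :=
  match pm with | none => false | some b => decide (s ≤ b)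

-- B's second pass (reversed), early `return False`
def pvBLoop (disk_map : List (Int × Int)) (defragmented_file_ids : List Int)
    (pm : List (Option Int)) : List Nat → Bool
  | [] => true
  | i :: rest =>
    let frag := disk_map.getD i (0, 0)
    if frag.1 != -1 && !(defragmented_file_ids.contains frag.1) && pvFits (pm.getD i none) frag.2 then
      false
    else pvBLoop disk_map defragmented_file_ids pm rest

def unfragment_one_file_alt (disk_map : List (Int × Int)) (defragmented_file_ids : List Int) : Bool :=
  let pm := pvBuildPM disk_map none
  pvBLoop disk_map defragmented_file_ids pm (List.range disk_map.length).reverse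

-- ===== PRECONDITION & SPEC =====
def Spec_unfragment_one_file (disk_map : List (Int × Int)) (defragmented_file_ids : List Int) (out : Bool) : Prop := out = unfragment_one_file_alt disk_map defragmented_file_ids
instance (disk_map : List (Int × Int)) (defragmented_file_ids : List Int) (out : Bool) : Decidable (Spec_unfragment_one_file disk_map defragmented_file_ids out) := by unfold Spec_unfragment_one_file; infer_instance

-- ===== CLAIM (what is proved, stated in full; the proofs are below) =====
def Claim_equal_unfragment_one_file : Prop := ∀ (disk_map : List (Int × Int)) (defragmented_file_ids : List Int), Dom_unfragment_one_file disk_map defragmented_file_ids → Spec_unfragment_one_file disk_map defragmented_file_ids (unfragment_one_file disk_map defragmented_file_ids)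

-- ===== LEMMAS AND PROOFS =====

-- "this free slot fits a file of size s"
def pvFit (s : Int) (q : Int × Int) : Bool := q.1 == -1 && decide (s ≤ q.2)

-- one pvStep: fitting against the updated prefix max = fitting against the old one or this slot
theorem pvFits_step (b : Option Int) (q : Int × Int) (s : Int) :
    pvFits (pvStep b q) s = (pvFits b s || pvFit s q) := by
  by_cases h : q.1 = -1
  · cases b with
    | none => simp [pvStep, pvFits, pvFit, h]
    | some b' =>
      by_cases h2 : b' < q.2
      · simp only [pvStep, pvFits, pvFit, h, beq_self_eq_true, Bool.true_and, h2, decide_true,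
          if_pos, ← Bool.decide_or]
        apply decide_eq_decide.mpr
        omega
      · simp only [pvStep, pvFits, pvFit, h, beq_self_eq_true, Bool.true_and, h2, decide_false,
          if_neg, Bool.false_eq_true, not_false_eq_true, ← Bool.decide_or]
        apply decide_eq_decide.mpr
        omega
  · simp [pvStep, pvFits, pvFit, h]

-- folding pvStep accumulates the prefix maximum of free sizes
theorem pvFits_foldl (l : List (Int × Int)) (b : Option Int) (s : Int) :
    pvFits (List.foldl pvStep b l) s = (pvFits b s || l.any (pvFit s)) := by
  induction l generalizing b with
  | nil => simp
  | cons q rest ih =>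
    simp [List.foldl_cons, ih, pvFits_step, Bool.or_assoc]

-- indexing into B's prefix_max list = folding pvStep over the prefix
theorem pvBuildPM_getD (l : List (Int × Int)) (b : Option Int) (i : Nat) (hi : i < l.length) :
    (pvBuildPM l b).getD i none = List.foldl pvStep b (l.take i) := by
  induction l generalizing b i with
  | nil => simp at hi
  | cons q rest ih =>
    cases i with
    | zero => simp [pvBuildPM]
    | succ n =>
      simp only [pvBuildPM, List.getD_cons_succ, List.take_succ_cons, List.foldl_cons]
      exact ih _ n (by simpa using hi)

-- A's inner scan over indices j < i = a scan of the prefix of length i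
theorem pvAInner_eq_take (dm : List (Int × Int)) (s : Int) (i : Nat) (hi : i ≤ dm.length) :
    pvAInner dm s i = (dm.take i).any (pvFit s) := by
  induction i with
  | zero => simp [pvAInner]
  | succ n ih =>
    have hn : n ≤ dm.length := le_of_lt (Nat.lt_of_lt_of_le (Nat.lt_succ_self n) hi)
    have hlt : n < dm.length := Nat.lt_of_succ_le hi
    simp only [pvAInner, List.range_succ, List.any_append, List.any_cons, List.any_nil] at *
    rw [ih hn]
    have ht : dm.take (n + 1) = dm.take n ++ [dm[n]] := by
      rw [List.take_add_one, List.getElem?_eq_getElem hlt]; rfl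
    rw [ht, List.any_append]
    simp [List.getD, List.getElem?_eq_getElem hlt, pvFit]

-- per-index conditions of the two reversed loops agree
theorem pvCond_eq (dm : List (Int × Int)) (ids : List Int) (i : Nat) (hi : i < dm.length) :
    (let frag := dm.getD i (0, 0);
      (frag.1 != -1 && !(ids.contains frag.1) &&
        pvFits ((pvBuildPM dm none).getD i none) frag.2))
      = (let frag := dm.getD i (0, 0);
         !(frag.1 == -1 || ids.contains frag.1) && pvAInner dm frag.2 i) := by
  simp only
  rw [pvBuildPM_getD dm none i hi, pvFits_foldl,
      pvAInner_eq_take dm _ i (le_of_lt hi)]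
  simp [pvFits, bne, Bool.and_assoc]

-- both loops are `not any` of their condition over the index list
theorem pvALoop_eq_any (dm : List (Int × Int)) (ids : List Int) (l : List Nat) :
    pvALoop dm ids l
      = !(l.any (fun i =>
          let frag := dm.getD i (0, 0)
          !(frag.1 == -1 || ids.contains frag.1) && pvAInner dm frag.2 i)) := by
  induction l with
  | nil => simp [pvALoop]
  | cons i rest ih =>
    by_cases h1 : (dm[i]?.getD (0, 0)).1 = -1
    · simp [pvALoop, List.getD, h1, ih]
    · by_cases h2 : (dm[i]?.getD (0, 0)).1 ∈ ids
      · simp [pvALoop, List.getD, h2, ih]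
      · cases h3 : pvAInner dm (dm[i]?.getD (0, 0)).2 i with
        | true => simp [pvALoop, List.getD, h1, h2, h3]
        | false => simp [pvALoop, List.getD, h1, h2, h3, ih]

theorem pvBLoop_eq_any (dm : List (Int × Int)) (ids : List Int) (pm : List (Option Int)) (l : List Nat) :
    pvBLoop dm ids pm l
      = !(l.any (fun i =>
          let frag := dm.getD i (0, 0)
          frag.1 != -1 && !(ids.contains frag.1) && pvFits (pm.getD i none) frag.2)) := by
  induction l with
  | nil => simp [pvBLoop]
  | cons i rest ih =>
    by_cases h1 : (dm[i]?.getD (0, 0)).1 = -1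
    · simp [pvBLoop, List.getD, h1, ih]
    · by_cases h2 : (dm[i]?.getD (0, 0)).1 ∈ ids
      · simp [pvBLoop, List.getD, h2, ih]
      · cases h3 : pvFits (pm[i]?.getD none) (dm[i]?.getD (0, 0)).2 with
        | true => simp [pvBLoop, List.getD, h1, h2, h3]
        | false => simp [pvBLoop, List.getD, h2, h3, ih]

theorem pvAny_congr {l : List Nat} {f g : Nat → Bool} (h : ∀ i ∈ l, f i = g i) :
    l.any f = l.any g := by
  induction l with
  | nil => rfl
  | cons x rest ih =>
    simp only [List.any_cons, h x (List.mem_cons_self ..),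
      ih (fun i hi => h i (List.mem_cons_of_mem _ hi))]

-- ===== VERDICT (by name: the statement is the Claim_ definition above) =====
theorem unfragment_one_file_spec : Claim_equal_unfragment_one_file := by
  intro dm ids _
  unfold Spec_unfragment_one_file unfragment_one_file unfragment_one_file_alt
  rw [pvALoop_eq_any, pvBLoop_eq_any]
  congr 1
  apply pvAny_congr
  intro i hi
  have hlt : i < dm.length := List.mem_range.mp (List.mem_reverse.mp hi)
  exact (pvCond_eq dm ids i hlt).symm
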